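-- pv_equiv track=rewrite | github.com/wajahatah/hand_in_pocket | nannotation_approach.py | split_continuous_sequences
-- ===== SOURCE A (Python) =====
-- def split_continuous_sequences(frames, min_window=5):
--     sequences = []
--     current_seq = [frames[0]]
--
--     for i in range(1, len(frames)):
--         _, _, prev_f, _ = frames[i - 1]
--         _, _, curr_f, _ = frames[i]
--         if curr_f == prev_f + 1:
--             current_seq.append(frames[i])
--         else:
--             if len(current_seq) >= min_window:
--                 sequences.append(current_seq)
--             current_seq = [frames[i]]
--
--     if len(current_seq) >= min_window:
--         sequences.append(current_seq)
--     return sequences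
-- ===== SOURCE B (Python) =====
-- def split_continuous_sequences(frames, min_window=5):
--     sequences = []
--     pos = 0
--     n = len(frames)
--     while pos < n:
--         end = pos + 1
--         while end < n and frames[end][2] == frames[end - 1][2] + 1:
--             end += 1
--         if end - pos >= min_window:
--             sequences.append(frames[pos:end])
--         pos = end
--     return sequences
-- ===== Notes on version B (the rewrite author's own statement) =====
-- stated objective: alternative
-- what changed: Replaces A's single-pass accumulator (growing current_seq, flush-on-break plus a final flush) by index-based run scanning: an inner loop finds the end of each maximal consecutive run and one slice frames[pos:end] is emitted per run, so there is no running sequence list and no trailing flush.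
-- outside the precondition, e.g. on split_continuous_sequences([], 5): A raises IndexError, B returns []
-- crash fix: On empty frames A raises IndexError (frames[0]); B naturally returns []. — e.g. on split_continuous_sequences([], 5): A raises IndexError, B returns []
import Mathlib
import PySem

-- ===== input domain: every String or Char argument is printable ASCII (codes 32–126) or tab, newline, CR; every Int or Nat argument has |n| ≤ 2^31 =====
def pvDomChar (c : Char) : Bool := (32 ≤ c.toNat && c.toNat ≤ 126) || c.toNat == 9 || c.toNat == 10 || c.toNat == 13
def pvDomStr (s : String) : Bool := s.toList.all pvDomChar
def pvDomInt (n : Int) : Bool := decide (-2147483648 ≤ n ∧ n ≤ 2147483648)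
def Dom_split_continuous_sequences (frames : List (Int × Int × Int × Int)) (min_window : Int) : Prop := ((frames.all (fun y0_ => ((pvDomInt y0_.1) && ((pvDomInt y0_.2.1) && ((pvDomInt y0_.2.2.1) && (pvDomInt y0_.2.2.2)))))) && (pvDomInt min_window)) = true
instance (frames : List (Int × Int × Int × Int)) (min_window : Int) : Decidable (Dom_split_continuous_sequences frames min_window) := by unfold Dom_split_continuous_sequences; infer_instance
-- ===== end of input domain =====

-- B replaces A's running current_seq accumulator by an inner scan that finds each
-- maximal consecutive run's end index and slices it out; same O(n) cost (objective: alternative).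

-- ===== PORT A =====
-- loop body: (sequences, current_seq) updated from the pair (frames[i-1], frames[i])
def aStep (min_window : Int)
    (st : List (List (Int × Int × Int × Int)) × List (Int × Int × Int × Int))
    (pc : (Int × Int × Int × Int) × (Int × Int × Int × Int)) :
    List (List (Int × Int × Int × Int)) × List (Int × Int × Int × Int) :=
  if pc.2.2.2.1 == pc.1.2.2.1 + 1 then
    (st.1, st.2 ++ [pc.2])
  else
    (if min_window ≤ (st.2.length : Int) then st.1 ++ [st.2] else st.1, [pc.2])

def split_continuous_sequences (frames : List (Int × Int × Int × Int)) (min_window : Int) : List (List (Int × Int × Int × Int)) :=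
  match frames with
  | [] => []  -- Python raises IndexError at frames[0]; excluded by Pre_
  | f0 :: rest =>
    -- for i in range(1, len(frames)): pairs (frames[i-1], frames[i]) = (f0 :: rest).zip rest
    let st := ((f0 :: rest).zip rest).foldl (aStep min_window) ([], [f0])
    if min_window ≤ (st.2.length : Int) then st.1 ++ [st.2] else st.1

-- ===== PORT B =====
-- inner while: advance end while frames[end][2] == frames[end-1][2] + 1
def bInner (frames : List (Int × Int × Int × Int)) (n e : Int) : Int :=
  if h : e < n ∧ ((PySem.List.pyGetD frames e (0,0,0,0)).2.2.1 ==
                  (PySem.List.pyGetD frames (e - 1) (0,0,0,0)).2.2.1 + 1) = true then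
    bInner frames n (e + 1)
  else e
termination_by (n - e).toNat
decreasing_by omega

theorem bInner_ge (frames : List (Int × Int × Int × Int)) (n e : Int) : e ≤ bInner frames n e := by
  unfold bInner
  split
  · have := bInner_ge frames n (e + 1); omega
  · omega
termination_by (n - e).toNat
decreasing_by omega

-- outer while over pos
def bLoop (frames : List (Int × Int × Int × Int)) (min_window n pos : Int) : List (List (Int × Int × Int × Int)) :=
  if _h : pos < n then
    let e := bInner frames n (pos + 1)
    (if min_window ≤ e - pos then [PySem.List.slice frames (some pos) (some e)] else []) ++
      bLoop frames min_window n e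
  else []
termination_by (n - pos).toNat
decreasing_by have := bInner_ge frames n (pos + 1); omega

def split_continuous_sequences_alt (frames : List (Int × Int × Int × Int)) (min_window : Int) : List (List (Int × Int × Int × Int)) :=
  bLoop frames min_window (frames.length : Int) 0

-- ===== PRECONDITION & SPEC =====
-- Pre_ excludes exactly the empty list, on which A raises IndexError at frames[0].
def Pre_split_continuous_sequences (frames : List (Int × Int × Int × Int)) (min_window : Int) : Prop := frames ≠ []
instance (frames : List (Int × Int × Int × Int)) (min_window : Int) : Decidable (Pre_split_continuous_sequences frames min_window) := by unfold Pre_split_continuous_sequences; infer_instance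
def pvWitness_split_continuous_sequences : (List (Int × Int × Int × Int)) × Int := ([(0, 0, 1, 0), (0, 0, 2, 0), (0, 0, 4, 0)], 2)

-- On empty frames A raises IndexError (frames[0]); B naturally returns [].
def Raises_split_continuous_sequences (frames : List (Int × Int × Int × Int)) (min_window : Int) : Prop := frames = []
instance (frames : List (Int × Int × Int × Int)) (min_window : Int) : Decidable (Raises_split_continuous_sequences frames min_window) := by unfold Raises_split_continuous_sequences; infer_instance
def pvRaiseWitness_split_continuous_sequences : (List (Int × Int × Int × Int)) × Int := ([], 5)
def pvRaiseWitnessOut_split_continuous_sequences : List (List (Int × Int × Int × Int)) := []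

def Spec_split_continuous_sequences (frames : List (Int × Int × Int × Int)) (min_window : Int) (out : List (List (Int × Int × Int × Int))) : Prop := out = split_continuous_sequences_alt frames min_window
instance (frames : List (Int × Int × Int × Int)) (min_window : Int) (out : List (List (Int × Int × Int × Int))) : Decidable (Spec_split_continuous_sequences frames min_window out) := by unfold Spec_split_continuous_sequences; infer_instance

-- ===== CLAIM (what is proved, stated in full; the proofs are below) =====
def Claim_equal_split_continuous_sequences : Prop := ∀ (frames : List (Int × Int × Int × Int)) (min_window : Int), Dom_split_continuous_sequences frames min_window → Pre_split_continuous_sequences frames min_window → Spec_split_continuous_sequences frames min_window (split_continuous_sequences frames min_window)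
def Claim_raises_split_continuous_sequences : Prop := (∀ (frames : List (Int × Int × Int × Int)) (min_window : Int), Dom_split_continuous_sequences frames min_window → Raises_split_continuous_sequences frames min_window → ¬ Pre_split_continuous_sequences frames min_window) ∧ (Dom_split_continuous_sequences (pvRaiseWitness_split_continuous_sequences.1) (pvRaiseWitness_split_continuous_sequences.2) ∧ Raises_split_continuous_sequences (pvRaiseWitness_split_continuous_sequences.1) (pvRaiseWitness_split_continuous_sequences.2) ∧ split_continuous_sequences_alt (pvRaiseWitness_split_continuous_sequences.1) (pvRaiseWitness_split_continuous_sequences.2) = pvRaiseWitnessOut_split_continuous_sequences)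

-- ===== LEMMAS AND PROOFS =====

-- length of the maximal consecutive run continuing after p
def pvRunLen (p : Int × Int × Int × Int) : List (Int × Int × Int × Int) → Nat
  | [] => 0
  | c :: rest => if c.2.2.1 == p.2.2.1 + 1 then pvRunLen c rest + 1 else 0

-- canonical recursive form of A's loop
def pvG (w : Int) (prev : Int × Int × Int × Int) (cur : List (Int × Int × Int × Int)) :
    List (Int × Int × Int × Int) → List (List (Int × Int × Int × Int))
  | [] => if w ≤ (cur.length : Int) then [cur] else []
  | c :: rest =>
    if c.2.2.1 == prev.2.2.1 + 1 then pvG w c (cur ++ [c]) rest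
    else (if w ≤ (cur.length : Int) then [cur] else []) ++ pvG w c [c] rest

theorem aFold_eq_pvG (w : Int) (l : List (Int × Int × Int × Int)) :
    ∀ (p : Int × Int × Int × Int) (cur : List (Int × Int × Int × Int))
      (acc : List (List (Int × Int × Int × Int))),
    (let st := ((p :: l).zip l).foldl (aStep w) (acc, cur);
      if w ≤ (st.2.length : Int) then st.1 ++ [st.2] else st.1) = acc ++ pvG w p cur l := by
  induction l with
  | nil =>
    intro p cur acc
    simp only [List.zip_nil_right, List.foldl_nil, pvG]
    split <;> simp
  | cons c l ih =>
    intro p cur acc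
    simp only [List.zip_cons_cons, List.foldl_cons, pvG, aStep]
    by_cases hadj : (c.2.2.1 == p.2.2.1 + 1) = true
    · simp only [hadj, if_true]
      exact ih c (cur ++ [c]) acc
    · simp only [hadj, if_false, Bool.false_eq_true]
      rw [ih c [c] _]
      split <;> simp
theorem pvG_closed (w : Int) (rest : List (Int × Int × Int × Int)) :
    ∀ (p : Int × Int × Int × Int) (cur : List (Int × Int × Int × Int)),
    pvG w p cur rest =
      (if w ≤ (cur.length : Int) + (pvRunLen p rest : Int) then [cur ++ rest.take (pvRunLen p rest)] else []) ++
      (match rest.drop (pvRunLen p rest) with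
       | [] => []
       | c :: r => pvG w c [c] r) := by
  induction rest with
  | nil =>
    intro p cur
    simp [pvG, pvRunLen]
  | cons c rest ih =>
    intro p cur
    by_cases hadj : (c.2.2.1 == p.2.2.1 + 1) = true
    · simp only [pvG, pvRunLen, hadj, if_true]
      rw [ih c (cur ++ [c])]
      have hlen : (((cur ++ [c]).length : Nat) : Int) + (pvRunLen c rest : Int)
           = (cur.length : Int) + ((pvRunLen c rest + 1 : Nat) : Int) := by
        simp only [List.length_append, List.length_cons, List.length_nil]; push_cast; ring
      rw [List.take_succ_cons, List.drop_succ_cons, hlen]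
      simp
    · simp only [pvG, pvRunLen, hadj, if_false, Bool.false_eq_true]
      simp

theorem bInner_eq (frames : List (Int × Int × Int × Int)) (rest : List (Int × Int × Int × Int)) :
    ∀ (f : Int × Int × Int × Int) (j : Nat), frames.drop j = f :: rest →
    bInner frames (frames.length : Int) ((j : Int) + 1) = (j : Int) + 1 + (pvRunLen f rest : Int) := by
  induction rest with
  | nil =>
    intro f j hd
    have hlen : j + 1 = frames.length := by
      have := congrArg List.length hd; simp at this; omega
    unfold bInner
    rw [dif_neg]
    · simp [pvRunLen]
    · intro hcon
      have := hcon.1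
      omega
  | cons c rest ih =>
    intro f j hd
    have hlen : j + 1 + (rest.length + 1) = frames.length := by
      have := congrArg List.length hd; simp at this; omega
    have hj1 : frames.drop (j + 1) = c :: rest := by
      rw [← List.tail_drop, hd]; rfl
    have hgetf : PySem.List.pyGetD frames ((j : Int)) (0,0,0,0) = f := by
      rw [PySem.List.pyGetD_natCast]
      have h0 : (frames.drop j)[0]? = some f := by rw [hd]; rfl
      rw [List.getElem?_drop, Nat.add_zero] at h0
      simp [List.getD, h0]
    have hgetc : PySem.List.pyGetD frames ((j : Int) + 1) (0,0,0,0) = c := by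
      have hcast : (j : Int) + 1 = ((j + 1 : Nat) : Int) := by push_cast; ring
      rw [hcast, PySem.List.pyGetD_natCast]
      have h0 : (frames.drop (j+1))[0]? = some c := by rw [hj1]; rfl
      rw [List.getElem?_drop, Nat.add_zero] at h0
      simp [List.getD, h0]
    unfold bInner
    by_cases hadj : (c.2.2.1 == f.2.2.1 + 1) = true
    · rw [dif_pos]
      · have hcast : (j : Int) + 1 + 1 = ((j + 1 : Nat) : Int) + 1 := by push_cast; ring
        rw [hcast, ih c (j + 1) hj1]
        simp only [pvRunLen, hadj, if_true]
        push_cast; ring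
      · constructor
        · omega
        · have : (j : Int) + 1 - 1 = (j : Int) := by ring
          rw [this, hgetf, hgetc]
          exact hadj
    · rw [dif_neg]
      · simp only [pvRunLen, hadj, if_false, Bool.false_eq_true]
        simp
      · intro hcon
        have := hcon.2
        have heq : (j : Int) + 1 - 1 = (j : Int) := by ring
        rw [heq, hgetf, hgetc] at this
        exact hadj this

theorem bLoop_eq (frames : List (Int × Int × Int × Int)) (w : Int) :
    ∀ (m j : Nat), frames.length ≤ j + m →
    bLoop frames w (frames.length : Int) ((j : Int)) =
      (match frames.drop j with
       | [] => []
       | f :: rest => pvG w f [f] rest) := by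
  intro m
  induction m with
  | zero =>
    intro j hm
    have hd : frames.drop j = [] := by simp; omega
    rw [hd]
    unfold bLoop
    rw [dif_neg (by omega)]
  | succ m ih =>
    intro j hm
    by_cases hj : j < frames.length
    · obtain ⟨f, rest, hd⟩ : ∃ f rest, frames.drop j = f :: rest := by
        cases h : frames.drop j with
        | nil => exfalso; have := congrArg List.length h; simp at this; omega
        | cons a b => exact ⟨a, b, rfl⟩
      rw [hd]
      unfold bLoop
      rw [dif_pos (by exact_mod_cast hj)]
      have he : bInner frames (frames.length : Int) ((j : Int) + 1) = (j : Int) + 1 + (pvRunLen f rest : Int) :=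
        bInner_eq frames rest f j hd
      simp only [he]
      have hcast : (j : Int) + 1 + (pvRunLen f rest : Int) = ((j + 1 + pvRunLen f rest : Nat) : Int) := by
        push_cast; ring
      have hslice : PySem.List.slice frames (some (j : Int)) (some ((j : Int) + 1 + (pvRunLen f rest : Int)))
          = f :: rest.take (pvRunLen f rest) := by
        rw [hcast, PySem.List.slice_natCast]
        rw [hd]
        have : j + 1 + pvRunLen f rest - j = pvRunLen f rest + 1 := by omega
        rw [this, List.take_succ_cons]
      have hdrop2 : frames.drop (j + 1 + pvRunLen f rest) = rest.drop (pvRunLen f rest) := by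
        have htl : frames.drop (j + 1) = rest := by rw [← List.tail_drop, hd]; rfl
        rw [← List.drop_drop, htl]
      have hrec : bLoop frames w (frames.length : Int) ((j : Int) + 1 + (pvRunLen f rest : Int))
          = (match rest.drop (pvRunLen f rest) with
             | [] => []
             | c :: r => pvG w c [c] r) := by
        rw [hcast, ih (j + 1 + pvRunLen f rest) (by omega), hdrop2]
      rw [hslice, hrec, pvG_closed w rest f [f]]
      have hcond : ((j : Int) + 1 + (pvRunLen f rest : Int) - (j : Int))
          = (([f].length : Nat) : Int) + (pvRunLen f rest : Int) := by
        simp; ring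
      rw [hcond]
      rfl
    · have hd : frames.drop j = [] := by simp; omega
      rw [hd]
      unfold bLoop
      rw [dif_neg (by omega)]

-- ===== VERDICT (by name: the statement is the Claim_ definition above) =====
theorem split_continuous_sequences_spec : Claim_equal_split_continuous_sequences := by
  intro frames min_window _ hpre
  unfold Spec_split_continuous_sequences
  match frames with
  | [] => exact absurd rfl hpre
  | f0 :: rest =>
    show split_continuous_sequences (f0 :: rest) min_window = split_continuous_sequences_alt (f0 :: rest) min_window
    simp only [split_continuous_sequences, split_continuous_sequences_alt]
    rw [aFold_eq_pvG min_window rest f0 [f0] []]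
    rw [show ((0 : Int)) = ((0 : Nat) : Int) by simp, bLoop_eq (f0 :: rest) min_window (f0 :: rest).length 0 (by omega)]
    simp

@[simp] theorem split_continuous_sequences_raises : Claim_raises_split_continuous_sequences := by
  unfold Claim_raises_split_continuous_sequences
  constructor
  · intro frames min_window _ hr hpre
    exact hpre hr
  · refine ⟨by decide, rfl, ?_⟩
    show split_continuous_sequences_alt [] 5 = []
    unfold split_continuous_sequences_alt
    rw [bLoop]
    norm_num
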